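-- pv_equiv track=rewrite | github.com/amyhuangtuzi/algorithms | getMaximumDistinctCount.py | getMaximumDistinctCount
-- ===== SOURCE A (Python) =====
-- from collections import Counter
--
-- def getMaximumDistinctCount(a, b, k):
--     count_a = Counter(a)
--     d = len(count_a)
--     s = sum(v - 1 for v in count_a.values())
--     set_a = set(count_a.keys())
--     P = set()
--
--     for num in b:
--         if num not in set_a:
--             P.add(num)
--     t = len(P)
--
--     return d + min(s, k, t)
-- ===== SOURCE B (Python) =====
-- def getMaximumDistinctCount(a, b, k):
--     def sorted_distinct(xs):
--         ys = sorted(xs)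
--         return len(ys) - sum(1 for u, v in zip(ys, ys[1:]) if u == v)
--
--     d = sorted_distinct(a)          # distinct values already in a
--     s = len(a) - d                  # replaceable duplicate slots in a
--     t = sorted_distinct(a + b) - d  # distinct values of b that are new
--     return d + min(s, k, t)
-- ===== Notes on version B (the rewrite author's own statement) =====
-- stated objective: alternative
-- what changed: Replaces the Counter/hash-set algorithm by a sorting one: distinct counts are obtained by counting equal adjacent pairs in sorted(a) and sorted(a+b), and the new-element budget is the difference distinct(a+b) - distinct(a) instead of a membership loop over b.
import Mathlib
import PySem

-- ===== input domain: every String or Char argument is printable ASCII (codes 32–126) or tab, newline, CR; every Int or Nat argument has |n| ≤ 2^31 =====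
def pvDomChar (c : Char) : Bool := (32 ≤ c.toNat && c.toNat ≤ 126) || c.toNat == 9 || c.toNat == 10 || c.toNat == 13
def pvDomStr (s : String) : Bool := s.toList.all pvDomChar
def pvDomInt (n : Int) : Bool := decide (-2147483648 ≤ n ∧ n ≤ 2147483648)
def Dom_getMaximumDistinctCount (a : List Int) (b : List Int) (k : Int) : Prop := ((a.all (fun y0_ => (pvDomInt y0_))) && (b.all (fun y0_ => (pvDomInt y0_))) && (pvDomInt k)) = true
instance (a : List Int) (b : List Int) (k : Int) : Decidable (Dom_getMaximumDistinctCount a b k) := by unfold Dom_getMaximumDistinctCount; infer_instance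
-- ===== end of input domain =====

-- B replaces the Counter/hash-set algorithm by a sorting one: distinct counts come from counting equal
-- adjacent pairs in sorted(a) and sorted(a+b), and the new-element budget is distinct(a+b) - distinct(a).


-- ===== PORT A =====
def getMaximumDistinctCount (a : List Int) (b : List Int) (k : Int) : Int :=
  let count_a := PySem.Dict.counter a
  let d : Int := (count_a.size : Int)
  let s : Int := count_a.values.foldl (fun acc v => acc + (v - 1)) 0
  let set_a : PySem.Set Int := PySem.Set.ofList count_a.keys
  let P : PySem.Set Int :=
    b.foldl (fun P num => if PySem.Set.contains set_a num then P else PySem.Set.add P num)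
      PySem.Set.empty
  let t : Int := PySem.Set.len P
  d + min (min s k) t

-- ===== PORT B =====
-- helper: Python's inner 'sorted_distinct(xs)' — sort, then len minus the number of equal adjacent pairs
def pvSortedDistinct (xs : List Int) : Int :=
  let ys := PySem.List.sorted xs (fun x => x) false
  (ys.length : Int)
    - (((ys.zip (PySem.List.slice ys (some 1) none)).filter (fun p => p.1 == p.2)).length : Int)

def getMaximumDistinctCount_alt (a : List Int) (b : List Int) (k : Int) : Int :=
  let d := pvSortedDistinct a
  let s := (a.length : Int) - d
  let t := pvSortedDistinct (a ++ b) - d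
  d + min (min s k) t

-- ===== PRECONDITION & SPEC =====
def Spec_getMaximumDistinctCount (a : List Int) (b : List Int) (k : Int) (out : Int) : Prop := out = getMaximumDistinctCount_alt a b k
instance (a : List Int) (b : List Int) (k : Int) (out : Int) : Decidable (Spec_getMaximumDistinctCount a b k out) := by unfold Spec_getMaximumDistinctCount; infer_instance

-- ===== CLAIM (what is proved, stated in full; the proofs are below) =====
def Claim_equal_getMaximumDistinctCount : Prop := ∀ (a : List Int) (b : List Int) (k : Int), Dom_getMaximumDistinctCount a b k → Spec_getMaximumDistinctCount a b k (getMaximumDistinctCount a b k)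

-- ===== LEMMAS AND PROOFS =====

-- on a ≤-sorted list, length = (#equal adjacent pairs) + (#distinct values)
lemma adjEq_card (l : List Int) (h : l.Pairwise (· ≤ ·)) :
    l.length = ((l.zip l.tail).filter (fun p => p.1 == p.2)).length + l.toFinset.card := by
  induction l with
  | nil => simp
  | cons x t ih =>
    match t, h with
    | [], _ => simp
    | y :: u, h =>
      have hxt : ∀ z ∈ y :: u, x ≤ z := (List.pairwise_cons.mp h).1
      have ht : (y :: u).Pairwise (· ≤ ·) := (List.pairwise_cons.mp h).2
      have ihr := ih ht
      simp only [List.tail_cons, List.toFinset_cons, List.length_cons] at ihr ⊢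
      by_cases hxy : x = y
      · have hmem : x ∈ insert y u.toFinset := by simp [hxy]
        rw [Finset.insert_eq_self.mpr hmem]
        simp only [List.zip_cons_cons, List.filter_cons]
        rw [if_pos (show ((x, y).1 == (x, y).2) = true by simp [hxy])]
        simp only [List.length_cons]
        omega
      · have hnot : x ∉ y :: u := by
          intro hmemx
          rcases List.mem_cons.mp hmemx with h1 | h2
          · exact hxy h1
          · have hyx : y ≤ x := (List.pairwise_cons.mp ht).1 x h2
            have hxy' : x ≤ y := hxt y (by simp)
            exact hxy (le_antisymm hxy' hyx)
        rw [Finset.card_insert_of_notMem (by simpa using hnot)]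
        simp only [List.zip_cons_cons, List.filter_cons]
        rw [if_neg (show ¬ ((x, y).1 == (x, y).2) = true by simp [hxy])]
        omega

-- B's helper counts the distinct values of xs
lemma pvSortedDistinct_eq (xs : List Int) : pvSortedDistinct xs = (xs.toFinset.card : Int) := by
  unfold pvSortedDistinct
  simp only [PySem.List.slice_from_one]
  have hp : (PySem.List.sorted xs (fun x => x) false).Pairwise (· ≤ ·) := by
    simpa using PySem.List.sorted_pairwise xs (fun x => x)
  have h := adjEq_card _ hp
  have hfin : (PySem.List.sorted xs (fun x => x) false).toFinset = xs.toFinset :=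
    List.toFinset_eq_of_perm _ _ (PySem.List.sorted_perm xs (fun x => x) false)
  rw [hfin] at h
  omega

-- len(set(xs)) = card of the set of values of xs
lemma ofList_len_card (xs : List Int) : (PySem.Set.ofList xs).length = xs.toFinset.card := by
  have hnd := PySem.Set.nodup_ofList xs
  have hfin : (PySem.Set.ofList xs).toFinset = xs.toFinset := by
    ext x
    simp [List.mem_toFinset, PySem.Set.mem_ofList]
  rw [← hfin, List.toFinset_card_of_nodup hnd]

-- len(Counter(a)) = len(set(a))
lemma size_counter (a : List Int) : (PySem.Dict.counter a).size = (PySem.Set.ofList a).length := by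
  have h : (PySem.Dict.counter a).keys = PySem.Set.ofList a := PySem.Dict.keys_counter a
  simpa [PySem.Dict.size, PySem.Dict.keys] using congrArg List.length h

-- sum of counts over the distinct elements = len(a)
lemma sum_counts (a : List Int) :
    ((PySem.Set.ofList a).map (fun x => (a.count x : Int))).sum = (a.length : Int) := by
  have hperm : (PySem.Set.ofList a).Perm a.dedup := by
    rw [List.perm_ext_iff_of_nodup (PySem.Set.nodup_ofList a) a.nodup_dedup]
    intro x
    rw [PySem.Set.mem_ofList, List.mem_dedup]
  have hsum : ((PySem.Set.ofList a).map (fun x => (a.count x : Int))).sum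
      = ((a.dedup).map (fun x => (a.count x : Int))).sum :=
    (hperm.map _).sum_eq
  have hN : ((a.dedup).map (fun x => List.count x a)).sum = a.length :=
    List.sum_map_count_dedup_eq_length a
  rw [hsum]
  have : ((a.dedup).map (fun x => (a.count x : Int))).sum
      = (((a.dedup).map (fun x => List.count x a)).sum : Int) := by
    induction a.dedup with
    | nil => simp
    | cons y ys ih => simp [ih]
  rw [this, hN]

-- the membership-filtered accumulation loop is a foldl of Set.add over the filtered list
lemma loop_filter (sa : PySem.Set Int) (b : List Int) (P : PySem.Set Int) :
    b.foldl (fun P num => if PySem.Set.contains sa num then P else PySem.Set.add P num) P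
      = (b.filter (fun x => !PySem.Set.contains sa x)).foldl PySem.Set.add P := by
  induction b generalizing P with
  | nil => rfl
  | cons x xs ih =>
    simp only [List.foldl_cons]
    by_cases h : PySem.Set.contains sa x
    · rw [if_pos h, List.filter_cons_of_neg (by rw [h]; decide), ih]
    · rw [if_neg h, List.filter_cons_of_pos (by rw [Bool.not_eq_true] at h; rw [h]; decide), ih, List.foldl_cons]

-- set(filter) = filter(set)
lemma ofList_filter (p : Int → Bool) (xs : List Int) :
    PySem.Set.ofList (xs.filter p) = (PySem.Set.ofList xs).filter p := by
  induction xs with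
  | nil => rfl
  | cons x xs ih =>
    by_cases h : p x
    · rw [List.filter_cons_of_pos h, PySem.Set.ofList_cons, PySem.Set.ofList_cons, ih]
      simp [PySem.Set.discard, List.filter_filter, Bool.and_comm, h]
    · rw [List.filter_cons_of_neg h, PySem.Set.ofList_cons, ih, PySem.Set.discard,
        List.filter_cons_of_neg h, List.filter_filter]
      apply List.filter_congr
      intro y _
      by_cases hyx : y = x
      · subst hyx; simp [h]
      · simp [hyx]

-- len(set(b) - set(a)) = card of the value-set difference
lemma diff_len_card (a b : List Int) :
    (PySem.Set.diff (PySem.Set.ofList b) (PySem.Set.ofList a)).length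
      = (b.toFinset \ a.toFinset).card := by
  have hd : PySem.Set.diff (PySem.Set.ofList b) (PySem.Set.ofList a)
      = (PySem.Set.ofList b).filter (fun x => !PySem.Set.contains (PySem.Set.ofList a) x) := rfl
  have hnd : (PySem.Set.diff (PySem.Set.ofList b) (PySem.Set.ofList a)).Nodup := by
    rw [hd]; exact (PySem.Set.nodup_ofList b).filter _
  have hfin : (PySem.Set.diff (PySem.Set.ofList b) (PySem.Set.ofList a)).toFinset
      = b.toFinset \ a.toFinset := by
    ext x
    simp only [List.mem_toFinset, Finset.mem_sdiff, hd, List.mem_filter,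
      PySem.Set.mem_ofList, PySem.Set.contains]
    simp
  rw [← hfin, List.toFinset_card_of_nodup hnd]

-- ===== VERDICT (by name: the statement is the Claim_ definition above) =====
theorem getMaximumDistinctCount_spec : Claim_equal_getMaximumDistinctCount := by
  intro a b k _
  show getMaximumDistinctCount a b k = getMaximumDistinctCount_alt a b k
  unfold getMaximumDistinctCount getMaximumDistinctCount_alt
  -- A's pieces
  have hd : ((PySem.Dict.counter a).size : Int) = (a.toFinset.card : Int) := by
    rw [size_counter, ofList_len_card]
  have hs : (PySem.Dict.counter a).values.foldl (fun acc v => acc + (v - 1)) 0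
      = (a.length : Int) - (a.toFinset.card : Int) := by
    rw [PySem.List.foldl_add ((PySem.Dict.counter a).values) (fun v => v - 1) 0]
    have hv : (PySem.Dict.counter a).values
        = (PySem.Set.ofList a).map (fun k => (a.count k : Int)) := by
      rw [PySem.Dict.values, PySem.Dict.items_counter, List.map_map]
      rfl
    rw [hv, List.map_map]
    have : ((PySem.Set.ofList a).map ((fun v => v - 1) ∘ fun k => (a.count k : Int))).sum
        = ((PySem.Set.ofList a).map (fun x => (a.count x : Int))).sum
          - ((PySem.Set.ofList a).length : Int) := by
      induction (PySem.Set.ofList a) with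
      | nil => simp
      | cons y ys ih => simp [ih]; ring
    rw [this, sum_counts, ofList_len_card]
    simp
  have hkeys : PySem.Set.ofList (PySem.Dict.counter a).keys = PySem.Set.ofList a := by
    rw [PySem.Dict.keys_counter, PySem.Set.ofList_ofList]
  have ht : PySem.Set.len (b.foldl (fun P num => if PySem.Set.contains (PySem.Set.ofList (PySem.Dict.counter a).keys) num then P else PySem.Set.add P num) PySem.Set.empty)
      = ((b.toFinset \ a.toFinset).card : Int) := by
    rw [hkeys, loop_filter]
    have heq : (b.filter (fun x => !PySem.Set.contains (PySem.Set.ofList a) x)).foldl PySem.Set.add PySem.Set.empty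
        = PySem.Set.diff (PySem.Set.ofList b) (PySem.Set.ofList a) := by
      rw [show ∀ l : List Int, l.foldl PySem.Set.add PySem.Set.empty = PySem.Set.ofList l from fun _ => rfl]
      rw [ofList_filter]
      rfl
    rw [heq]
    simp [PySem.Set.len, diff_len_card]
  -- B's pieces
  have hb1 : pvSortedDistinct a = (a.toFinset.card : Int) := pvSortedDistinct_eq a
  have hb2 : pvSortedDistinct (a ++ b) = ((a.toFinset ∪ b.toFinset).card : Int) := by
    rw [pvSortedDistinct_eq, List.toFinset_append]
  have hcard : (b.toFinset \ a.toFinset).card + a.toFinset.card = (a.toFinset ∪ b.toFinset).card := by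
    rw [Finset.union_comm]
    exact Finset.card_sdiff_add_card b.toFinset a.toFinset
  simp only [hd, hs, ht, hb1, hb2]
  have hsub : ((b.toFinset \ a.toFinset).card : Int)
      = ((a.toFinset ∪ b.toFinset).card : Int) - (a.toFinset.card : Int) := by
    omega
  rw [hsub]
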